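-- pv_equiv track=rewrite | github.com/grassrootseconomics/vms | vmsutils.py | shuffleMix
-- ===== SOURCE A (Python) =====
-- def shuffleMix(ztraders):
--     #ztraders = ['1','2','3','4','5','6','7','8','9','10','11']
--
--     A = list(ztraders)
--     numT = len(ztraders)
--
--     B = A[:int(len(A)/2)]
--     C = A[int(len(A)/2):]
--     D = []
--
--     lenB=len(B)
--     lenC=len(C)
--     inc = 0
--     if lenC>=lenB:
--         for c in C:
--             D.append(c)
--             if inc < lenB:
--                 D.append(B[inc])
--                 inc+=1
--     else:
--         for b in B:
--             D.append(b)
--             if inc < lenC: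
--                 D.append(C[inc])
--                 inc+=1
--
--     D = list(reversed(D))
--
--     return D
-- ===== SOURCE B (Python) =====
-- def shuffleMix(ztraders):
--     half = len(ztraders) // 2
--     out = [ztraders[-1]] if len(ztraders) % 2 else []
--     for i in range(half - 1, -1, -1):
--         out.append(ztraders[i])           # B[i]
--         out.append(ztraders[half + i])    # C[i]
--     return out
-- ===== Notes on version B (the rewrite author's own statement) =====
-- stated objective: simpler
-- what changed: B drops A's copy/slice/interleave-with-index-counter loop (and its dead lenB>lenC branch) and the final reversed() pass, building the reversed result directly back-to-front: the odd leftover element first, then pairs (ztraders[i], ztraders[half+i]) for i from half-1 down to 0.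
import Mathlib
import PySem

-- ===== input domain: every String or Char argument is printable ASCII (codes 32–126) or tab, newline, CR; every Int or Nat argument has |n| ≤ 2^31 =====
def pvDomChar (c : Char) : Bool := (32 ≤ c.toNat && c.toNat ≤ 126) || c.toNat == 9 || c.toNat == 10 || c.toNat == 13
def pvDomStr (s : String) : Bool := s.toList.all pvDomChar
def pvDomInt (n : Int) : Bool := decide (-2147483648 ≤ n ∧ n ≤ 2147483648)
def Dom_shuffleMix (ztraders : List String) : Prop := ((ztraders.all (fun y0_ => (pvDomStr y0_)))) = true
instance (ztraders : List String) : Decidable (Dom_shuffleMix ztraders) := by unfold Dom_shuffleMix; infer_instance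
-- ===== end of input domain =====

-- B replaces A's interleave-then-reverse index-counter loop (with its dead lenB>lenC branch)
-- by building the reversed result directly back-to-front from the two halves; objective: simpler.

-- ===== PORT A =====
-- the 'for x in X: D.append(x); if inc < lenY: D.append(Y[inc]); inc += 1' loop of A
-- (both of A's branches have this exact shape, with (C,B) resp. (B,C) as (X,Y));
-- Y[inc] is under the guard inc < lenY = Y.length, so getD is exact (no IndexError reachable)
def pvLoopA (Y : List String) (lenY : Nat) : List String → Nat → List String → List String
  | [], _, D => D
  | x :: xs, inc, D =>
    let D := D ++ [x]
    if inc < lenY then pvLoopA Y lenY xs (inc + 1) (D ++ [Y.getD inc ""])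
    else pvLoopA Y lenY xs inc D

def shuffleMix (ztraders : List String) : List String :=
  let A := ztraders
  -- int(len(A)/2): true division then int(): exact truncating division
  let half : Int := PySem.Int.truncdiv (A.length : Int) 2
  let B := PySem.List.slice A none (some half)
  let C := PySem.List.slice A (some half) none
  let lenB := B.length
  let lenC := C.length
  let D := if lenB ≤ lenC then pvLoopA B lenB C 0 [] else pvLoopA C lenC B 0 []
  D.reverse

-- ===== PORT B =====
def shuffleMix_alt (ztraders : List String) : List String :=
  let half : Int := PySem.Int.floordiv (ztraders.length : Int) 2
  -- ztraders[-1] is only read when len % 2 ≠ 0, so the list is nonempty and pyGetD is exact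
  let out : List String :=
    if PySem.Int.mod (ztraders.length : Int) 2 ≠ 0 then [PySem.List.pyGetD ztraders (-1) ""] else []
  (PySem.List.pyRange (half - 1) (-1) (-1)).foldl
    (fun out i =>
      (out ++ [PySem.List.pyGetD ztraders i ""]) ++ [PySem.List.pyGetD ztraders (half + i) ""])
    out

-- ===== PRECONDITION & SPEC =====
def Spec_shuffleMix (ztraders : List String) (out : List String) : Prop := out = shuffleMix_alt ztraders
instance (ztraders : List String) (out : List String) : Decidable (Spec_shuffleMix ztraders out) := by unfold Spec_shuffleMix; infer_instance

-- ===== CLAIM (what is proved, stated in full; the proofs are below) =====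
def Claim_equal_shuffleMix : Prop := ∀ (ztraders : List String), Dom_shuffleMix ztraders → Spec_shuffleMix ztraders (shuffleMix ztraders)

-- ===== LEMMAS AND PROOFS =====

-- canonical interleaving: itl C B = [C0, B0, C1, B1, …] (leftover of C appended)
def pvItl : List String → List String → List String
  | [], _ => []
  | c :: cs, [] => c :: pvItl cs []
  | c :: cs, b :: bs => c :: b :: pvItl cs bs

lemma pvItl_nil_right : ∀ (C : List String), pvItl C [] = C := by
  intro C; induction C with
  | nil => rfl
  | cons c cs ih => simp [pvItl, ih]

lemma pvLoopA_eq (B : List String) :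
    ∀ (C : List String) (inc : Nat) (D : List String),
      pvLoopA B B.length C inc D = D ++ pvItl C (B.drop inc) := by
  intro C
  induction C with
  | nil => intro inc D; simp [pvLoopA, pvItl]
  | cons c cs ih =>
    intro inc D
    by_cases h : inc < B.length
    · have hdrop : B.drop inc = B[inc] :: B.drop (inc + 1) :=
        List.drop_eq_getElem_cons h
      simp only [pvLoopA, if_pos h, ih]
      rw [hdrop]
      simp [pvItl, List.getD_eq_getElem?_getD, List.getElem?_eq_getElem h]
    · have hdrop : B.drop inc = [] := List.drop_eq_nil_of_le (by omega)
      simp only [pvLoopA, if_neg h, ih, hdrop]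
      simp [pvItl, pvItl_nil_right]

-- reversed interleaving as a back-to-front flatMap over indices
lemma pvItl_rev :
    ∀ (B C : List String), C.length = B.length ∨ C.length = B.length + 1 →
      (pvItl C B).reverse =
        (if C.length = B.length + 1 then [C.getD B.length ""] else []) ++
          (List.range B.length).flatMap
            (fun j => [B.getD (B.length - 1 - j) "", C.getD (B.length - 1 - j) ""]) := by
  intro B
  induction B with
  | nil =>
    intro C h
    rcases h with h | h
    · have : C = [] := List.eq_nil_of_length_eq_zero h
      subst this; simp [pvItl]
    · match C, h with
      | [c], _ => simp [pvItl]
  | cons b bs ih =>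
    intro C h
    match C with
    | [] => simp at h
    | c :: cs =>
      have h' : cs.length = bs.length ∨ cs.length = bs.length + 1 := by
        simp at h; omega
      have ihcs := ih cs h'
      have hmap :
          (List.range bs.length).flatMap
              (fun j => [(b :: bs).getD (bs.length - j) "",
                         (c :: cs).getD (bs.length - j) ""]) =
          (List.range bs.length).flatMap
              (fun j => [bs.getD (bs.length - 1 - j) "", cs.getD (bs.length - 1 - j) ""]) := by
        apply List.flatMap_congr
        intro j hj
        have hj' : j < bs.length := List.mem_range.mp hj
        have h1 : bs.length - j = (bs.length - 1 - j) + 1 := by omega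
        rw [h1]
        simp
      simp only [pvItl, List.reverse_cons, List.append_assoc, List.length_cons,
        List.range_succ, List.flatMap_append, List.flatMap_cons, List.flatMap_nil,
        List.append_nil, Nat.add_sub_cancel]
      rw [ihcs, hmap, Nat.sub_self]
      simp [List.append_assoc]

-- A in normal form: reversed interleaving, via pvLoopA_eq and pvItl_rev
lemma pvA_normal (z : List String) :
    shuffleMix z =
      (if z.length - z.length / 2 = z.length / 2 + 1
        then [(z.drop (z.length / 2)).getD (z.length / 2) ""] else []) ++
        (List.range (z.length / 2)).flatMap
          (fun j => [(z.take (z.length / 2)).getD (z.length / 2 - 1 - j) "",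
                     (z.drop (z.length / 2)).getD (z.length / 2 - 1 - j) ""]) := by
  have hkn : z.length / 2 ≤ z.length := Nat.div_le_self _ _
  have htd : PySem.Int.truncdiv (z.length : Int) 2 = ((z.length / 2 : Nat) : Int) := by
    simp [PySem.Int.truncdiv]
  simp only [shuffleMix, htd]
  rw [PySem.List.slice_to z (by positivity), PySem.List.slice_from z (by positivity)]
  simp only [Int.toNat_natCast]
  have hlt : (z.take (z.length / 2)).length = z.length / 2 := by
    simp [List.length_take, Nat.min_eq_left hkn]
  have hld : (z.drop (z.length / 2)).length = z.length - z.length / 2 := by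
    simp [List.length_drop]
  rw [if_pos (by rw [hlt, hld]; omega)]
  rw [pvLoopA_eq, List.drop_zero, List.nil_append]
  rw [pvItl_rev (z.take (z.length / 2)) (z.drop (z.length / 2)) (by rw [hlt, hld]; omega)]
  rw [hlt, hld]

-- B in normal form: the same flatMap, via pyRange_neg_one and foldl_append_eq_flatMap
lemma pvB_normal (z : List String) :
    shuffleMix_alt z =
      (if z.length - z.length / 2 = z.length / 2 + 1
        then [(z.drop (z.length / 2)).getD (z.length / 2) ""] else []) ++
        (List.range (z.length / 2)).flatMap
          (fun j => [(z.take (z.length / 2)).getD (z.length / 2 - 1 - j) "",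
                     (z.drop (z.length / 2)).getD (z.length / 2 - 1 - j) ""]) := by
  have hkn : z.length / 2 ≤ z.length := Nat.div_le_self _ _
  have hfd : PySem.Int.floordiv (z.length : Int) 2 = ((z.length / 2 : Nat) : Int) := by
    rw [PySem.Int.floordiv_eq_ediv_of_pos (by omega)]; omega
  have hmd : PySem.Int.mod (z.length : Int) 2 = ((z.length % 2 : Nat) : Int) := by
    rw [PySem.Int.mod_eq_emod_of_pos (by omega)]; omega
  simp only [shuffleMix_alt, hfd, hmd]
  rw [PySem.List.pyRange_neg_one]
  have ht : (((z.length / 2 : Nat) : Int) - 1 - (-1)).toNat = z.length / 2 := by omega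
  rw [ht, List.foldl_map]
  simp only [List.append_assoc, List.singleton_append]
  rw [PySem.List.foldl_append_eq_flatMap
      (fun j : Nat => [PySem.List.pyGetD z (((z.length / 2 : Nat) : Int) - 1 - (j : Int)) "",
        PySem.List.pyGetD z (((z.length / 2 : Nat) : Int) + ((((z.length / 2 : Nat) : Int)) - 1 - (j : Int))) ""])]
  congr 1
  · -- tails
    by_cases ho : z.length % 2 = 0
    · rw [if_neg (by omega), if_neg (by omega)]
    · have hne : z ≠ [] := by
        intro hnil; subst hnil; simp at ho
      rw [if_pos (by omega), if_pos (by omega)]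
      rw [PySem.List.pyGetD_neg_one z "" hne]
      rw [List.getLast_eq_getElem]
      rw [List.getD_eq_getElem?_getD,
          List.getElem?_drop,
          List.getElem?_eq_getElem (by omega)]
      simp
      congr 1
      omega
  · -- flatMaps
    apply List.flatMap_congr
    intro j hj
    have hjk : j < z.length / 2 := List.mem_range.mp hj
    have h1 : PySem.List.pyGetD z (((z.length / 2 : Nat) : Int) - 1 - (j : Int)) ""
        = z.getD (z.length / 2 - 1 - j) "" := by
      rw [PySem.List.pyGetD_of_nonneg z "" (by omega)]
      congr 1; omega
    have h2 : PySem.List.pyGetD z (((z.length / 2 : Nat) : Int) + (((z.length / 2 : Nat) : Int) - 1 - (j : Int))) ""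
        = z.getD (z.length / 2 + (z.length / 2 - 1 - j)) "" := by
      rw [PySem.List.pyGetD_of_nonneg z "" (by omega)]
      congr 1; omega
    rw [h1, h2]
    have h3 : (z.take (z.length / 2)).getD (z.length / 2 - 1 - j) "" = z.getD (z.length / 2 - 1 - j) "" := by
      rw [List.getD_eq_getElem?_getD, List.getD_eq_getElem?_getD, List.getElem?_take_of_lt (by omega)]
    have h4 : (z.drop (z.length / 2)).getD (z.length / 2 - 1 - j) "" = z.getD (z.length / 2 + (z.length / 2 - 1 - j)) "" := by
      simp [List.getD_eq_getElem?_getD, List.getElem?_drop]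
    rw [h3, h4]

-- ===== VERDICT (by name: the statement is the Claim_ definition above) =====
theorem shuffleMix_spec : Claim_equal_shuffleMix := by
  intro z _
  unfold Spec_shuffleMix
  rw [pvA_normal, pvB_normal]
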